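-- pv_equiv track=rewrite | github.com/408456/Algorithms | The second semester/lab1/task 15/main.py | delete_caps
-- ===== SOURCE A (Python) =====
-- def delete_caps(s):
--     stack = []
--     result = []
--     for char in s:
--         if char in '({[':
--             stack.append((char, len(result)))
--             result.append(None)
--         elif char in ')}]':
--             if stack and ((stack[-1][0] == '(' and char == ')') or
--                           (stack[-1][0] == '[' and char == ']') or
--                           (stack[-1][0] == '{' and char == '}')):
--                 last_open, index = stack.pop()
--                 result[index] = last_open
--                 result.append(char)
--     return ''.join(c for c in result if c is not None)
-- ===== SOURCE B (Python) =====
-- def delete_caps(s):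
--     closing = {'(': ')', '[': ']', '{': '}'}
--
--     def parse(i, closer):
--         # Parse from position i until `closer` is found (or the end of s).
--         # Returns (kept_text, next_position, found_closer?).
--         out = []
--         while i < len(s):
--             c = s[i]
--             if c in closing:
--                 inner, i, ok = parse(i + 1, closing[c])
--                 out.append(c + inner + closing[c] if ok else inner)
--             elif c == closer:
--                 return ''.join(out), i + 1, True
--             else:
--                 i += 1
--         return ''.join(out), i, False
--
--     return parse(0, None)[0]
-- ===== Notes on version B (the rewrite author's own statement) =====
-- stated objective: alternative
-- what changed: Replaces A's explicit stack with placeholder back-patching (reserve a None slot per opener, overwrite it at pop time, filter at the end) by a recursive-descent parser: parse(i, closer) scans for its own closer, recursively parses nested groups via the call stack, and assembles each matched group compositionally as opener+inner+closer, dropping unmatched pieces; no explicit stack, no placeholders, no final filter pass.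
import Mathlib
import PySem

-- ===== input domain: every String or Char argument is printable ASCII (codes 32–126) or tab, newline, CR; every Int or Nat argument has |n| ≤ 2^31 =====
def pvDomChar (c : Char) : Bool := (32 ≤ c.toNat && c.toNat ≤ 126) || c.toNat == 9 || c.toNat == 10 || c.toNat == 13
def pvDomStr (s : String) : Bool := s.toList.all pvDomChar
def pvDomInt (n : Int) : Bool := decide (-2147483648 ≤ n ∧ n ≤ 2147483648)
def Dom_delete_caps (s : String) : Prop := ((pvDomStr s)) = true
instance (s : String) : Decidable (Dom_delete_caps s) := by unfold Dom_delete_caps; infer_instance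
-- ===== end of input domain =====

-- B replaces A's single pass with an explicit stack, None-placeholder back-patching and a
-- final filter by a recursive-descent parser (implicit call stack) that assembles each
-- matched bracket group compositionally; return value only; objective: alternative.


-- ===== PORT A =====
-- Python's in-place `result[index] = last_open` is ported with List.set; the index was
-- recorded as len(result) at push time so it is always in range (Python never raises here).
def dcAstep (acc : List (Char × Nat) × List (Option Char)) (c : Char) :
    List (Char × Nat) × List (Option Char) :=
  if c = '(' ∨ c = '{' ∨ c = '[' then
    (acc.1 ++ [(c, acc.2.length)], acc.2 ++ [none])
  else if c = ')' ∨ c = '}' ∨ c = ']' then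
    match acc.1.getLast? with
    | some (t, idx) =>
      if (t = '(' ∧ c = ')') ∨ (t = '[' ∧ c = ']') ∨ (t = '{' ∧ c = '}') then
        (acc.1.dropLast, (acc.2.set idx (some t)) ++ [some c])
      else acc
    | none => acc
  else acc

def delete_caps (s : String) : String :=
  String.mk ((s.toList.foldl dcAstep ([], [])).2.filterMap id)

-- ===== PORT B =====
-- Source B's `closing` dict as a function: closing[c] for the three openers.
def dcClose (c : Char) : Char := if c = '(' then ')' else if c = '[' then ']' else '}'
-- Source B's `c in closing`.
def dcIsOpen (c : Char) : Bool := c = '(' || c = '[' || c = '{'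

-- Source B's recursive `parse(i, closer)`: the while loop is the tail of the same recursion
-- (unchanged co), a nested group is the recursive call with `closing[c]`; fuel only makes
-- it total (the wrapper passes length+1, which dcG below shows is always enough).
def dcParse (l : List Char) : Nat → Nat → Option Char → List Char × Nat × Bool
  | 0, i, _ => ([], i, false)
  | fuel + 1, i, co =>
    match l[i]? with
    | none => ([], i, false)
    | some c =>
      if dcIsOpen c then
        let r1 := dcParse l fuel (i + 1) (some (dcClose c))
        let r2 := dcParse l fuel r1.2.1 co
        ((if r1.2.2 then c :: (r1.1 ++ [dcClose c]) else r1.1) ++ r2.1, r2.2)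
      else if some c = co then ([], i + 1, true)
      else dcParse l fuel (i + 1) co

def delete_caps_alt (s : String) : String :=
  String.mk (dcParse s.toList (s.toList.length + 1) 0 none).1

-- ===== PRECONDITION & SPEC =====
def Spec_delete_caps (s : String) (out : String) : Prop := out = delete_caps_alt s
instance (s : String) (out : String) : Decidable (Spec_delete_caps s out) := by unfold Spec_delete_caps; infer_instance

-- ===== CLAIM (what is proved, stated in full; the proofs are below) =====
def Claim_equal_delete_caps : Prop := ∀ (s : String), Dom_delete_caps s → Spec_delete_caps s (delete_caps s)

-- ===== LEMMAS AND PROOFS =====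

-- Both ports are related to one abstract machine: state = (committed output, stack of
-- frames (opener, accumulated content)); A's (stack, result) list is its encoding
-- (dcEncStAux/dcEncRes), B's parse is its defunctionalisation (dcG).
def dcPush (st : List Char × List (Char × List Char)) (piece : List Char) :
    List Char × List (Char × List Char) :=
  match st.2.getLast? with
  | none => (st.1 ++ piece, st.2)
  | some (t, seg) => (st.1, st.2.dropLast ++ [(t, seg ++ piece)])
def dcM (st : List Char × List (Char × List Char)) (c : Char) :
    List Char × List (Char × List Char) :=
  if dcIsOpen c then (st.1, st.2 ++ [(c, [])])
  else
    match st.2.getLast? with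
    | some (t, seg) =>
      if c = dcClose t then dcPush (st.1, st.2.dropLast) (t :: (seg ++ [c])) else st
    | none => st
def dcWeight (pend : List (Char × List Char)) : Nat :=
  (pend.map (fun p => 1 + p.2.length)).sum
def dcEncStAux : Nat → List (Char × List Char) → List (Char × Nat)
  | _, [] => []
  | base, p :: rest => (p.1, base) :: dcEncStAux (base + 1 + p.2.length) rest
def dcEncRes (done : List Char) (pend : List (Char × List Char)) : List (Option Char) :=
  done.map some ++ (pend.map (fun p => none :: p.2.map some)).flatten

lemma dcEncStAux_concat (b : Nat) (xs : List (Char × List Char)) (x : Char × List Char) :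
    dcEncStAux b (xs ++ [x]) = dcEncStAux b xs ++ [(x.1, b + dcWeight xs)] := by
  induction xs generalizing b with
  | nil => simp [dcEncStAux, dcWeight]
  | cons p rest ih =>
    simp only [List.cons_append, dcEncStAux, ih, dcWeight, List.map_cons, List.sum_cons]
    have : b + 1 + p.2.length + (List.map (fun p => 1 + p.2.length) rest).sum
        = b + (1 + p.2.length + (List.map (fun p => 1 + p.2.length) rest).sum) := by omega
    rw [this]

lemma dcEncRes_length (done : List Char) (pend : List (Char × List Char)) :
    (dcEncRes done pend).length = done.length + dcWeight pend := by
  induction pend with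
  | nil => simp [dcEncRes, dcWeight]
  | cons p rest ih =>
    simp [dcEncRes, dcWeight, List.sum_cons] at ih ⊢
    omega

lemma dcSet_mid {α : Type} (xs ys : List (Option α)) (t : α) :
    (xs ++ (none :: ys)).set xs.length (some t) = xs ++ (some t :: ys) := by
  induction xs with
  | nil => simp
  | cons x xs ih => simp [ih]

lemma dcEncRes_concat (done : List Char) (q : List (Char × List Char)) (t : Char) (seg : List Char) :
    dcEncRes done (q ++ [(t, seg)]) = dcEncRes done q ++ (none :: seg.map some) := by
  simp [dcEncRes]

lemma dcIsOpen_iff (c : Char) : dcIsOpen c = true ↔ (c = '(' ∨ c = '{' ∨ c = '[') := by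
  simp [dcIsOpen]; tauto

lemma dcClose_closer (t : Char) (ht : dcIsOpen t = true) :
    dcClose t = ')' ∨ dcClose t = ']' ∨ dcClose t = '}' := by
  rcases (dcIsOpen_iff t).mp ht with h | h | h <;> subst h <;> simp [dcClose]

lemma dcMatch_iff (t c : Char) (ht : dcIsOpen t = true) :
    ((t = '(' ∧ c = ')') ∨ (t = '[' ∧ c = ']') ∨ (t = '{' ∧ c = '}')) ↔ c = dcClose t := by
  rcases (dcIsOpen_iff t).mp ht with h | h | h <;> subst h <;> simp [dcClose]

lemma dcA_step (done : List Char) (pend : List (Char × List Char)) (c : Char)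
    (hop : ∀ p ∈ pend, dcIsOpen p.1 = true) :
    dcAstep (dcEncStAux done.length pend, dcEncRes done pend) c
      = (dcEncStAux (dcM (done, pend) c).1.length (dcM (done, pend) c).2,
         dcEncRes (dcM (done, pend) c).1 (dcM (done, pend) c).2) := by
  by_cases hcO : c = '(' ∨ c = '{' ∨ c = '['
  · have hb : dcIsOpen c = true := (dcIsOpen_iff c).mpr hcO
    simp only [dcAstep, if_pos hcO, dcM, hb, if_pos]
    rw [dcEncStAux_concat, dcEncRes_length, dcEncRes_concat]
    simp
  · have hb : ¬ dcIsOpen c = true := fun h => hcO ((dcIsOpen_iff c).mp h)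
    simp only [dcM, hb, Bool.false_eq_true, if_false, if_neg]
    rcases List.eq_nil_or_concat pend with hp | ⟨q, ⟨t, seg⟩, hp⟩
    · subst hp
      by_cases hcC : c = ')' ∨ c = '}' ∨ c = ']' <;>
        simp [dcAstep, hcO, hcC, dcEncStAux, dcEncRes]
    · subst hp
      simp only [List.concat_eq_append] at hop ⊢
      have ht : dcIsOpen t = true := hop (t, seg) (by simp)
      have hgl : (dcEncStAux done.length (q ++ [(t, seg)])).getLast?
          = some (t, done.length + dcWeight q) := by
        rw [dcEncStAux_concat]; simp
      have hgl2 : (q ++ [(t, seg)]).getLast? = some (t, seg) := by simp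
      by_cases hcC : c = ')' ∨ c = '}' ∨ c = ']'
      · simp only [dcAstep, if_neg hcO, if_pos hcC, hgl, hgl2]
        by_cases hm : c = dcClose t
        · have hm' : (t = '(' ∧ c = ')') ∨ (t = '[' ∧ c = ']') ∨ (t = '{' ∧ c = '}') :=
            (dcMatch_iff t c ht).mpr hm
          simp only [if_pos hm', if_pos hm]
          have hdl : (dcEncStAux done.length (q ++ [(t, seg)])).dropLast
              = dcEncStAux done.length q := by
            rw [dcEncStAux_concat]; simp
          have hset : (dcEncRes done (q ++ [(t, seg)])).set (done.length + dcWeight q) (some t)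
              = dcEncRes done q ++ (some t :: seg.map some) := by
            rw [dcEncRes_concat, ← dcEncRes_length done q]
            exact dcSet_mid _ _ _
          rw [hdl, hset]
          have hdlq : (q ++ [(t, seg)]).dropLast = q := by simp
          rw [hdlq]
          rcases List.eq_nil_or_concat q with hq | ⟨q0, ⟨t2, seg2⟩, hq⟩
          · subst hq
            simp [dcPush, dcEncRes, dcEncStAux, hm]
          · subst hq
            simp only [List.concat_eq_append] at *
            have : dcPush (done, q0 ++ [(t2, seg2)]) (t :: (seg ++ [c]))
                = (done, q0 ++ [(t2, seg2 ++ (t :: (seg ++ [c])))]) := by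
              simp [dcPush]
            rw [this]
            simp only [Prod.mk.injEq]
            constructor
            · rw [dcEncStAux_concat, dcEncStAux_concat]
            · rw [dcEncRes_concat, dcEncRes_concat]
              simp
        · have hm' : ¬ ((t = '(' ∧ c = ')') ∨ (t = '[' ∧ c = ']') ∨ (t = '{' ∧ c = '}')) :=
            fun h => hm ((dcMatch_iff t c ht).mp h)
          simp only [if_neg hm', if_neg hm]
      · have hm : ¬ c = dcClose t := by
          intro h; rcases dcClose_closer t ht with h2 | h2 | h2 <;> rw [h2] at h <;>
            exact hcC (by tauto)
        simp only [dcAstep, if_neg hcO, if_neg hcC, hgl2, if_neg hm]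

lemma dcM_open (done : List Char) (pend : List (Char × List Char)) (c : Char)
    (hop : ∀ p ∈ pend, dcIsOpen p.1 = true) :
    ∀ p ∈ (dcM (done, pend) c).2, dcIsOpen p.1 = true := by
  intro p hp
  unfold dcM at hp
  by_cases hb : dcIsOpen c = true
  · rw [if_pos hb] at hp
    rcases List.mem_append.mp hp with h | h
    · exact hop p h
    · simp at h; rw [h]; exact hb
  · rw [if_neg hb] at hp
    rcases List.eq_nil_or_concat' pend with hq | ⟨q, ⟨t, seg⟩, hq⟩
    · subst hq; simp at hp
    · subst hq
      simp only [List.getLast?_concat] at hp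
      by_cases hm : c = dcClose t
      · rw [if_pos hm] at hp
        simp only [dcPush, List.dropLast_concat] at hp
        rcases List.eq_nil_or_concat' q with hq0 | ⟨q0, ⟨t2, seg2⟩, hq0⟩
        · subst hq0; simp at hp
        · subst hq0
          simp only [List.dropLast_concat, List.getLast?_concat] at hp
          rcases List.mem_append.mp hp with h | h
          · exact hop p (List.mem_append_left _ (List.mem_append_left _ h))
          · simp at h; rw [h]
            exact hop (t2, seg2) (by simp)
      · rw [if_neg hm] at hp
        exact hop p hp

lemma dcA_fold (l : List Char) :
    ∀ (done : List Char) (pend : List (Char × List Char)),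
    (∀ p ∈ pend, dcIsOpen p.1 = true) →
    l.foldl dcAstep (dcEncStAux done.length pend, dcEncRes done pend)
      = (dcEncStAux (l.foldl dcM (done, pend)).1.length (l.foldl dcM (done, pend)).2,
         dcEncRes (l.foldl dcM (done, pend)).1 (l.foldl dcM (done, pend)).2) := by
  induction l with
  | nil => intro done pend _; simp
  | cons c l ih =>
    intro done pend hop
    simp only [List.foldl_cons]
    rw [dcA_step done pend c hop]
    have hst : dcM (done, pend) c = ((dcM (done, pend) c).1, (dcM (done, pend) c).2) := rfl
    rw [hst, ih _ _ (dcM_open done pend c hop)]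

def dcFin (st : List Char × List (Char × List Char)) : List Char :=
  st.1 ++ (st.2.map Prod.snd).flatten

lemma dcExtract (done : List Char) (pend : List (Char × List Char)) :
    (dcEncRes done pend).filterMap id = dcFin (done, pend) := by
  unfold dcEncRes dcFin
  rw [List.filterMap_append]
  congr 1
  · simp
  · induction pend with
    | nil => simp
    | cons p rest ih =>
      simp only [List.map_cons, List.flatten_cons, List.filterMap_append, ih]
      simp

lemma dcParse_progress (l : List Char) :
    ∀ (fuel i : Nat) (co : Option Char), l.length + 1 ≤ fuel + i → i ≤ l.length →
    i ≤ (dcParse l fuel i co).2.1 ∧ (dcParse l fuel i co).2.1 ≤ l.length ∧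
      ((dcParse l fuel i co).2.2 = true → i < (dcParse l fuel i co).2.1) ∧
      ((dcParse l fuel i co).2.2 = false → (dcParse l fuel i co).2.1 = l.length) := by
  intro fuel
  induction fuel with
  | zero => intro i co h1 h2; omega
  | succ f ih =>
    intro i co h1 h2
    cases hg : l[i]? with
    | none =>
      have hi : i = l.length := by
        have := List.getElem?_eq_none_iff.mp hg
        omega
      simp [dcParse, hg, hi]
    | some c =>
      have hi : i < l.length := by
        rcases Nat.lt_or_ge i l.length with h | h
        · exact h
        · rw [List.getElem?_eq_none_iff.mpr h] at hg; cases hg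
      by_cases hO : dcIsOpen c = true
      · have h1' := ih (i + 1) (some (dcClose c)) (by omega) (by omega)
        have hj1a : i + 1 ≤ (dcParse l f (i + 1) (some (dcClose c))).2.1 := h1'.1
        have hj1b := h1'.2.1
        have h2' := ih (dcParse l f (i + 1) (some (dcClose c))).2.1 co (by omega) hj1b
        simp only [dcParse, hg, hO, if_pos]
        refine ⟨by omega, by omega, fun hb => by omega, fun hb => h2'.2.2.2 hb⟩
      · by_cases hco : some c = co
        · simp only [dcParse, hg, hO, Bool.false_eq_true, if_false, if_pos hco]
          exact ⟨by omega, by omega, fun _ => by omega, fun hb => by simp at hb⟩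
        · simp only [dcParse, hg, hO, Bool.false_eq_true, if_false, if_neg hco]
          have h1' := ih (i + 1) co (by omega) (by omega)
          exact ⟨by omega, h1'.2.1, fun hb => by have := h1'.1; omega, h1'.2.2.2⟩

lemma dcParse_none_false (l : List Char) :
    ∀ (fuel i : Nat), (dcParse l fuel i none).2.2 = false := by
  intro fuel
  induction fuel with
  | zero => intro i; rfl
  | succ f ih =>
    intro i
    cases hg : l[i]? with
    | none => simp [dcParse, hg]
    | some c =>
      by_cases hO : dcIsOpen c = true
      · simp only [dcParse, hg, hO, if_pos]
        exact ih _
      · simp only [dcParse, hg, hO, Bool.false_eq_true, if_false,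
          if_neg (by simp : ¬ some c = (none : Option Char))]
        exact ih _

def dcCo (pend : List (Char × List Char)) : Option Char :=
  pend.getLast?.map (fun p => dcClose p.1)

def dcPopPush (done : List Char) (pend : List (Char × List Char)) (out : List Char) :
    List Char × List (Char × List Char) :=
  match pend.getLast? with
  | none => (done, pend)
  | some (t, seg) => dcPush (done, pend.dropLast) (t :: ((seg ++ out) ++ [dcClose t]))

lemma dcCo_push (done : List Char) (pend : List (Char × List Char)) (piece : List Char) :
    dcCo ((dcPush (done, pend) piece).2) = dcCo pend := by
  rcases List.eq_nil_or_concat' pend with hq | ⟨q, ⟨t, seg⟩, hq⟩ <;> subst hq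
  · rfl
  · simp [dcPush, dcCo]

lemma dcFin_push (done : List Char) (pend : List (Char × List Char)) (piece : List Char) :
    dcFin (dcPush (done, pend) piece) = dcFin (done, pend) ++ piece := by
  rcases List.eq_nil_or_concat' pend with hq | ⟨q, ⟨t, seg⟩, hq⟩ <;> subst hq
  · simp [dcPush, dcFin]
  · simp [dcPush, dcFin]

lemma dcParse_end (l : List Char) (fuel : Nat) (co : Option Char) (h : 1 ≤ fuel) :
    dcParse l fuel l.length co = ([], l.length, false) := by
  cases fuel with
  | zero => omega
  | succ f => simp [dcParse, List.getElem?_eq_none_iff.mpr (le_refl _)]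

lemma dcParse_succ_open (l : List Char) (f i : Nat) (c : Char) (co : Option Char)
    (hg : l[i]? = some c) (hO : dcIsOpen c = true) :
    dcParse l (f + 1) i co =
      ((if (dcParse l f (i + 1) (some (dcClose c))).2.2 then
          c :: ((dcParse l f (i + 1) (some (dcClose c))).1 ++ [dcClose c])
        else (dcParse l f (i + 1) (some (dcClose c))).1)
        ++ (dcParse l f (dcParse l f (i + 1) (some (dcClose c))).2.1 co).1,
       (dcParse l f (dcParse l f (i + 1) (some (dcClose c))).2.1 co).2) := by
  simp [dcParse, hg, hO]

lemma dcParse_succ_close (l : List Char) (f i : Nat) (c : Char) (co : Option Char)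
    (hg : l[i]? = some c) (hO : ¬ dcIsOpen c = true) (hco : some c = co) :
    dcParse l (f + 1) i co = ([], i + 1, true) := by
  cases hco
  simp [dcParse, hg, hO]

lemma dcParse_succ_skip (l : List Char) (f i : Nat) (c : Char) (co : Option Char)
    (hg : l[i]? = some c) (hO : ¬ dcIsOpen c = true) (hco : ¬ some c = co) :
    dcParse l (f + 1) i co = dcParse l f (i + 1) co := by
  simp [dcParse, hg, hO, hco]

lemma dcIsOpen_close (t : Char) : dcIsOpen (dcClose t) = false := by
  by_cases h1 : t = '(' <;> by_cases h2 : t = '[' <;> simp [dcClose, h1, h2, dcIsOpen]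

lemma dcG (l : List Char) :
    ∀ (k fuel i : Nat) (done : List Char) (pend : List (Char × List Char)),
    i ≤ l.length → l.length - i ≤ k → l.length + 1 ≤ fuel + i →
    dcFin (List.foldl dcM (done, pend) (l.drop i)) =
      (if (dcParse l fuel i (dcCo pend)).2.2 then
        dcFin (List.foldl dcM
          (dcPopPush done pend (dcParse l fuel i (dcCo pend)).1)
          (l.drop (dcParse l fuel i (dcCo pend)).2.1))
      else done ++ (pend.map Prod.snd).flatten ++ (dcParse l fuel i (dcCo pend)).1) := by
  intro k
  induction k with
  | zero =>
    intro fuel i done pend h1 h2 h3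
    have hi : i = l.length := by omega
    subst hi
    rw [dcParse_end l fuel _ (by omega)]
    simp [dcFin]
  | succ k ih =>
    intro fuel i done pend h1 h2 h3
    rcases Nat.lt_or_ge i l.length with hi | hi
    · cases fuel with
      | zero => omega
      | succ f =>
        have hg : l[i]? = some l[i] := List.getElem?_eq_getElem hi
        have hdrop : l.drop i = l[i] :: l.drop (i + 1) := List.drop_eq_getElem_cons hi
        set c := l[i] with hc
        by_cases hO : dcIsOpen c = true
        · -- opener: one nested parse, then the loop continues at this level
          rcases hp1 : dcParse l f (i + 1) (some (dcClose c)) with ⟨o1, j1, b1⟩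
          rw [dcParse_succ_open l f i c _ hg hO, hp1]
          have hco' : dcCo (pend ++ [(c, [])]) = some (dcClose c) := by simp [dcCo]
          have hstep : dcM (done, pend) c = (done, pend ++ [(c, [])]) := by
            simp [dcM, hO]
          have hIH1 := ih f (i + 1) done (pend ++ [(c, [])]) (by omega) (by omega) (by omega)
          rw [hco', hp1] at hIH1
          have hprog := dcParse_progress l f (i + 1) (some (dcClose c)) (by omega) (by omega)
          rw [hp1] at hprog
          dsimp only at hIH1 hprog ⊢
          have hpop1 : dcPopPush done (pend ++ [(c, [])]) o1
              = dcPush (done, pend) (c :: (o1 ++ [dcClose c])) := by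
            simp [dcPopPush]
          rw [hdrop, List.foldl_cons, hstep]
          cases b1 with
          | true =>
            rw [if_pos rfl] at hIH1
            rw [hIH1, hpop1]
            have hj1 : i + 1 < j1 := hprog.2.2.1 rfl
            have hj1n : j1 ≤ l.length := hprog.2.1
            rcases hp2 : dcParse l f j1 (dcCo pend) with ⟨o2, j2, b2⟩
            have hIH2 := ih f j1 (dcPush (done, pend) (c :: (o1 ++ [dcClose c]))).1
              (dcPush (done, pend) (c :: (o1 ++ [dcClose c]))).2 hj1n (by omega) (by omega)
            have hpp : ((dcPush (done, pend) (c :: (o1 ++ [dcClose c]))).1,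
                (dcPush (done, pend) (c :: (o1 ++ [dcClose c]))).2)
                = dcPush (done, pend) (c :: (o1 ++ [dcClose c])) := rfl
            rw [hpp, dcCo_push, hp2] at hIH2
            dsimp only at hIH2 ⊢
            rw [hIH2]
            cases b2 with
            | true =>
              rw [if_pos rfl, if_pos rfl, if_pos rfl]
              have hpendne : pend ≠ [] := by
                intro hnil
                subst hnil
                have hff := dcParse_none_false l f j1
                have hp2' : dcParse l f j1 none = (o2, j2, true) := hp2
                rw [hp2'] at hff
                simp at hff
              rcases List.eq_nil_or_concat' pend with hq | ⟨q, ⟨t, seg⟩, hq⟩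
              · exact absurd hq hpendne
              · subst hq
                simp [dcPopPush, dcPush, List.append_assoc]
            | false =>
              simp only [Bool.false_eq_true, if_false, if_pos rfl]
              have hfp := dcFin_push done pend (c :: (o1 ++ [dcClose c]))
              simp only [dcFin] at hfp
              rw [hfp]
              simp
          | false =>
            rw [if_neg (by simp)] at hIH1
            have hj1 : j1 = l.length := hprog.2.2.2 rfl
            subst hj1
            rw [dcParse_end l f _ (by omega)]
            dsimp only
            rw [if_neg (by simp), hIH1]
            simp
        · by_cases hco : some c = dcCo pend
          · rw [dcParse_succ_close l f i c _ hg hO hco]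
            dsimp only
            rw [if_pos rfl]
            have hpendne : pend ≠ [] := by
              intro hnil; subst hnil; simp [dcCo] at hco
            rcases List.eq_nil_or_concat' pend with hq | ⟨q, ⟨t, seg⟩, hq⟩
            · exact absurd hq hpendne
            · subst hq
              have hcc : c = dcClose t := by
                simp [dcCo] at hco
                exact hco
              have hstep : dcM (done, q ++ [(t, seg)]) c
                  = dcPush (done, q) (t :: (seg ++ [c])) := by
                simp [dcM, hcc, dcIsOpen_close]
              rw [hdrop, List.foldl_cons, hstep]
              simp [dcPopPush, hcc]
          · rw [dcParse_succ_skip l f i c _ hg hO hco]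
            have hstep : dcM (done, pend) c = (done, pend) := by
              rcases List.eq_nil_or_concat' pend with hq | ⟨q, ⟨t, seg⟩, hq⟩ <;> subst hq
              · simp [dcM, hO]
              · have hcc : ¬ c = dcClose t := by
                  intro h
                  apply hco
                  simp [dcCo, h]
                simp [dcM, hO, hcc]
            rw [hdrop, List.foldl_cons, hstep]
            exact ih f (i + 1) done pend (by omega) (by omega) (by omega)
    · have hi' : i = l.length := by omega
      subst hi'
      rw [dcParse_end l fuel _ (by omega)]
      simp [dcFin]

lemma dcKey (l : List Char) :
    (l.foldl dcAstep ([], [])).2.filterMap id = (dcParse l (l.length + 1) 0 none).1 := by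
  have hA := dcA_fold l [] [] (by intro p hp; cases hp)
  have h0 : ((dcEncStAux ([] : List Char).length ([] : List (Char × List Char))),
      dcEncRes [] []) = (([] : List (Char × Nat)), ([] : List (Option Char))) := by
    simp [dcEncStAux, dcEncRes]
  rw [h0] at hA
  rw [hA]
  dsimp only
  rw [dcExtract]
  have heta : ((l.foldl dcM ([], [])).1, (l.foldl dcM ([], [])).2) = l.foldl dcM ([], []) := rfl
  rw [heta]
  have hG := dcG l l.length (l.length + 1) 0 [] [] (by omega) (by omega) (by omega)
  have hb : (dcParse l (l.length + 1) 0 (dcCo [])).2.2 = false := by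
    have hc0 : dcCo ([] : List (Char × List Char)) = none := rfl
    rw [hc0]
    exact dcParse_none_false l _ 0
  rw [if_neg (by rw [hb]; simp)] at hG
  have hc0 : dcCo ([] : List (Char × List Char)) = none := rfl
  rw [hc0] at hG
  simp only [List.drop_zero] at hG
  rw [hG]
  simp

-- ===== VERDICT (by name: the statement is the Claim_ definition above) =====
theorem delete_caps_spec : Claim_equal_delete_caps := by
  intro s _
  unfold Spec_delete_caps delete_caps delete_caps_alt
  rw [dcKey s.toList]
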